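-- pv_equiv track=rewrite | github.com/joelgoldschmidt0214/bookmark2obsidian | tests/test_integration_performance.py | _generate_chrome_bookmark_html
-- ===== SOURCE A (Python) =====
-- def _generate_chrome_bookmark_html(bookmark_count: int) -> str:
--     """Chrome形式のブックマークHTMLを生成"""
--     html_parts = [
--         "<!DOCTYPE NETSCAPE-Bookmark-file-1>",
--         '<META HTTP-EQUIV="Content-Type" CONTENT="text/html; charset=UTF-8">',
--         "<TITLE>Bookmarks</TITLE>",
--         "<H1>Bookmarks Menu</H1>",
--         "<DL><p>",
--     ]
--
--     # Chrome特有の属性を含むブックマークを生成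
--     for i in range(bookmark_count):
--         folder_name = f"Chrome Folder {i // 50}"
--         bookmark_title = f"Chrome Bookmark {i}"
--         bookmark_url = f"https://chrome-example{i}.com"
--         add_date = str(1600000000 + i)  # Chrome形式のタイムスタンプ
--
--         if i % 50 == 0:  # 新しいフォルダを開始
--             html_parts.append(
--                 f'<DT><H3 ADD_DATE="{add_date}" LAST_MODIFIED="{add_date}">{folder_name}</H3>'
--             )
--             html_parts.append("<DL><p>")
--
--         html_parts.append(
--             f'<DT><A HREF="{bookmark_url}" ADD_DATE="{add_date}">{bookmark_title}</A>'
--         )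
--
--         if (i + 1) % 50 == 0:  # フォルダを閉じる
--             html_parts.append("</DL><p>")
--
--     html_parts.append("</DL><p>")
--     return "\n".join(html_parts)
-- ===== SOURCE B (Python) =====
-- def _generate_chrome_bookmark_html(bookmark_count: int) -> str:
--     """Chrome形式のブックマークHTMLを生成 (direct string building, folder by folder)"""
--
--     def bookmark_line(i):
--         stamp = str(1600000000 + i)
--         return f'<DT><A HREF="https://chrome-example{i}.com" ADD_DATE="{stamp}">Chrome Bookmark {i}</A>\n'
--
--     def folder_block(f):
--         lo = 50 * f
--         hi = min(lo + 50, bookmark_count)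
--         stamp = str(1600000000 + lo)
--         block = f'<DT><H3 ADD_DATE="{stamp}" LAST_MODIFIED="{stamp}">Chrome Folder {f}</H3>\n<DL><p>\n'
--         for i in range(lo, hi):
--             block += bookmark_line(i)
--         if hi == lo + 50:
--             block += "</DL><p>\n"
--         return block
--
--     header = (
--         "<!DOCTYPE NETSCAPE-Bookmark-file-1>\n"
--         '<META HTTP-EQUIV="Content-Type" CONTENT="text/html; charset=UTF-8">\n'
--         "<TITLE>Bookmarks</TITLE>\n"
--         "<H1>Bookmarks Menu</H1>\n"
--         "<DL><p>\n"
--     )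
--     body = "".join(folder_block(f) for f in range((bookmark_count + 49) // 50))
--     return header + body + "</DL><p>"
-- ===== Notes on version B (the rewrite author's own statement) =====
-- stated objective: alternative
-- what changed: Replaced A's flat list of lines with modulus tests joined by '\n' at the end by direct string concatenation of newline-terminated pieces: an outer loop over folders builds each folder's block as one string (header, its bookmarks, closing tag only when full), and the blocks are concatenated after a single merged header literal.
import Mathlib
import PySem

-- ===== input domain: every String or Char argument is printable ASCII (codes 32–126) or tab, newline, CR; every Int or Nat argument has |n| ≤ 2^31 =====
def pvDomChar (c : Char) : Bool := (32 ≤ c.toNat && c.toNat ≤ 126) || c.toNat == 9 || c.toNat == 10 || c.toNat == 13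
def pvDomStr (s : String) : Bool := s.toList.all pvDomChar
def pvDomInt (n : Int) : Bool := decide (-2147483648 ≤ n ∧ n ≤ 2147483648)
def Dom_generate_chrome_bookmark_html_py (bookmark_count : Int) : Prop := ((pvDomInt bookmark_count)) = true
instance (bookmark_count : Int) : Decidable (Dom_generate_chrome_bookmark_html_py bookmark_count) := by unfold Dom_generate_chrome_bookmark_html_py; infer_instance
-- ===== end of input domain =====

-- B builds the result by direct string concatenation, one self-contained folder block at a
-- time (newline-terminated pieces), instead of A's flat list of lines joined with "\n"
-- (objective: alternative decomposition, no speed claim).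

-- ===== PORT A =====
def pvHdrA (i : Int) : String :=
  "<DT><H3 ADD_DATE=\"" ++ PySem.Int.toStr (1600000000 + i) ++ "\" LAST_MODIFIED=\"" ++
    PySem.Int.toStr (1600000000 + i) ++ "\">Chrome Folder " ++
    PySem.Int.toStr (PySem.Int.floordiv i 50) ++ "</H3>"

def pvBmA (i : Int) : String :=
  "<DT><A HREF=\"https://chrome-example" ++ PySem.Int.toStr i ++ ".com\" ADD_DATE=\"" ++
    PySem.Int.toStr (1600000000 + i) ++ "\">Chrome Bookmark " ++ PySem.Int.toStr i ++ "</A>"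

def generate_chrome_bookmark_html_py (bookmark_count : Int) : String :=
  let html_parts : List String :=
    ["<!DOCTYPE NETSCAPE-Bookmark-file-1>",
     "<META HTTP-EQUIV=\"Content-Type\" CONTENT=\"text/html; charset=UTF-8\">",
     "<TITLE>Bookmarks</TITLE>",
     "<H1>Bookmarks Menu</H1>",
     "<DL><p>"]
  let html_parts := (PySem.List.pyRange 0 bookmark_count 1).foldl (fun acc i =>
    let acc := if PySem.Int.mod i 50 == 0 then acc ++ [pvHdrA i, "<DL><p>"] else acc
    let acc := acc ++ [pvBmA i]
    if PySem.Int.mod (i + 1) 50 == 0 then acc ++ ["</DL><p>"] else acc) html_parts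
  PySem.Str.join "\n" (html_parts ++ ["</DL><p>"])

-- ===== PORT B =====
def pvLine (i : Int) : String :=
  "<DT><A HREF=\"https://chrome-example" ++ PySem.Int.toStr i ++ ".com\" ADD_DATE=\"" ++
    PySem.Int.toStr (1600000000 + i) ++ "\">Chrome Bookmark " ++ PySem.Int.toStr i ++ "</A>\n"

def pvBlock (bookmark_count f : Int) : String :=
  let lo := 50 * f
  let hi := min (lo + 50) bookmark_count
  let stamp := PySem.Int.toStr (1600000000 + lo)
  let block := "<DT><H3 ADD_DATE=\"" ++ stamp ++ "\" LAST_MODIFIED=\"" ++ stamp ++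
      "\">Chrome Folder " ++ PySem.Int.toStr f ++ "</H3>\n<DL><p>\n"
  let block := (PySem.List.pyRange lo hi 1).foldl (fun b i => b ++ pvLine i) block
  if hi == lo + 50 then block ++ "</DL><p>\n" else block

def generate_chrome_bookmark_html_py_alt (bookmark_count : Int) : String :=
  let header :=
    "<!DOCTYPE NETSCAPE-Bookmark-file-1>\n<META HTTP-EQUIV=\"Content-Type\" CONTENT=\"text/html; charset=UTF-8\">\n<TITLE>Bookmarks</TITLE>\n<H1>Bookmarks Menu</H1>\n<DL><p>\n"
  let body := PySem.Str.join ""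
    ((PySem.List.pyRange 0 (PySem.Int.floordiv (bookmark_count + 49) 50) 1).map
      (pvBlock bookmark_count))
  header ++ body ++ "</DL><p>"

-- ===== PRECONDITION & SPEC =====
def Spec_generate_chrome_bookmark_html_py (bookmark_count : Int) (out : String) : Prop := out = generate_chrome_bookmark_html_py_alt bookmark_count
instance (bookmark_count : Int) (out : String) : Decidable (Spec_generate_chrome_bookmark_html_py bookmark_count out) := by unfold Spec_generate_chrome_bookmark_html_py; infer_instance

-- ===== CLAIM (what is proved, stated in full; the proofs are below) =====
def Claim_equal_generate_chrome_bookmark_html_py : Prop := ∀ (bookmark_count : Int), Dom_generate_chrome_bookmark_html_py bookmark_count → Spec_generate_chrome_bookmark_html_py bookmark_count (generate_chrome_bookmark_html_py bookmark_count)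

-- ===== LEMMAS AND PROOFS =====

/-- `s` followed by a newline, as characters (what "\n".join contributes per non-last line). -/
def pvAddNL (s : String) : List Char := s.toList ++ ['\n']

/-- Line-list view of A's loop iteration i. -/
def pvChunk (i : Int) : List String :=
  (if PySem.Int.mod i 50 == 0 then [pvHdrA i, "<DL><p>"] else []) ++ [pvBmA i] ++
    (if PySem.Int.mod (i + 1) 50 == 0 then ["</DL><p>"] else [])

/-- Folder header string (proof-side view of B's block head). -/
def pvHdrB (f start : Int) : String :=
  "<DT><H3 ADD_DATE=\"" ++ PySem.Int.toStr (1600000000 + start) ++ "\" LAST_MODIFIED=\"" ++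
    PySem.Int.toStr (1600000000 + start) ++ "\">Chrome Folder " ++ PySem.Int.toStr f ++ "</H3>"

/-- Bookmark line without trailing newline (proof-side view of B's line). -/
def pvBmB (i : Int) : String :=
  "<DT><A HREF=\"https://chrome-example" ++ PySem.Int.toStr i ++ ".com\" ADD_DATE=\"" ++
    PySem.Int.toStr (1600000000 + i) ++ "\">Chrome Bookmark " ++ PySem.Int.toStr i ++ "</A>"

/-- Line-list view of B's folder block f. -/
def pvBStrings (n f : Int) : List String :=
  let start := 50 * f
  let size := if n - start < 50 then n - start else 50
  [pvHdrB f start, "<DL><p>"] ++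
    (PySem.List.pyRange 0 size 1).map (fun j => pvBmB (start + j)) ++
    (if size == 50 then ["</DL><p>"] else [])

/-- Nat-level chunk. -/
def pvNChunk (k : Nat) : List String :=
  (if k % 50 = 0 then [pvHdrB ((k / 50 : Nat)) (k : Int), "<DL><p>"] else []) ++ [pvBmB (k : Int)] ++
    (if (k + 1) % 50 = 0 then ["</DL><p>"] else [])

/-- Nat-level folder block for total count m, folder index f. -/
def pvNBlock (m f : Nat) : List String :=
  [pvHdrB (f : Int) ((50 * f : Nat) : Int), "<DL><p>"] ++
    (List.range (min (m - 50 * f) 50)).map (fun j => pvBmB ((50 * f + j : Nat) : Int)) ++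
    (if min (m - 50 * f) 50 = 50 then ["</DL><p>"] else [])

lemma pv_flatMap_congr {α β : Type} {l : List α} {f g : α → List β}
    (h : ∀ a ∈ l, f a = g a) : l.flatMap f = l.flatMap g := by
  induction l with
  | nil => rfl
  | cons x xs ih =>
    simp only [List.flatMap_cons]
    rw [h x (by simp), ih (fun a ha => h a (by simp [ha]))]

lemma pvA_parts (n : Int) (init : List String) :
    (PySem.List.pyRange 0 n 1).foldl (fun acc i =>
      let acc := if PySem.Int.mod i 50 == 0 then acc ++ [pvHdrA i, "<DL><p>"] else acc
      let acc := acc ++ [pvBmA i]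
      if PySem.Int.mod (i + 1) 50 == 0 then acc ++ ["</DL><p>"] else acc) init
    = init ++ (PySem.List.pyRange 0 n 1).flatMap pvChunk := by
  have hb : (fun (acc : List String) (i : Int) =>
      let acc := if PySem.Int.mod i 50 == 0 then acc ++ [pvHdrA i, "<DL><p>"] else acc
      let acc := acc ++ [pvBmA i]
      if PySem.Int.mod (i + 1) 50 == 0 then acc ++ ["</DL><p>"] else acc)
      = fun acc i => acc ++ pvChunk i := by
    funext acc i
    simp only [pvChunk]
    split_ifs <;> simp
  rw [hb, PySem.List.foldl_append_eq_flatMap]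

lemma pvChunk_cast (k : Nat) : pvChunk (k : Int) = pvNChunk k := by
  have h1 : PySem.Int.mod (k : Int) 50 = ((k % 50 : Nat) : Int) := by
    exact_mod_cast PySem.Int.mod_natCast k 50
  have h2 : PySem.Int.mod ((k : Int) + 1) 50 = (((k + 1) % 50 : Nat) : Int) := by
    have : ((k : Int) + 1) = ((k + 1 : Nat) : Int) := by push_cast; ring
    rw [this]; exact_mod_cast PySem.Int.mod_natCast (k + 1) 50
  have h3 : PySem.Int.floordiv (k : Int) 50 = ((k / 50 : Nat) : Int) := by
    exact_mod_cast PySem.Int.floordiv_natCast k 50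
  have h4 : pvHdrA (k : Int) = pvHdrB ((k / 50 : Nat)) (k : Int) := by
    simp only [pvHdrA, pvHdrB, h3]
  have h5 : pvBmA (k : Int) = pvBmB (k : Int) := rfl
  simp only [pvChunk, pvNChunk, h1, h2, h4, h5, beq_iff_eq, Nat.cast_eq_zero]

lemma pvMain (m : Nat) :
    (List.range m).flatMap pvNChunk = (List.range ((m + 49) / 50)).flatMap (pvNBlock m) := by
  induction m with
  | zero => simp
  | succ m ih =>
    rw [List.range_succ, List.flatMap_append, ih]
    by_cases hr : m % 50 = 0
    · have hF : (m + 49) / 50 = m / 50 := by omega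
      have hF' : (m + 1 + 49) / 50 = m / 50 + 1 := by omega
      rw [hF, hF', List.range_succ, List.flatMap_append]
      have hstable : ∀ f ∈ List.range (m / 50), pvNBlock (m + 1) f = pvNBlock m f := by
        intro f hf
        rw [List.mem_range] at hf
        have hm1 : min (m - 50 * f) 50 = 50 := by omega
        have hm2 : min (m + 1 - 50 * f) 50 = 50 := by omega
        simp only [pvNBlock, hm1, hm2]
      rw [pv_flatMap_congr hstable]
      congr 1
      simp only [List.flatMap_cons, List.flatMap_nil, List.append_nil]
      have hm1 : min (m + 1 - 50 * (m / 50)) 50 = 1 := by omega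
      have hq : 50 * (m / 50) = m := by omega
      have hc : (m + 1) % 50 ≠ 0 := by omega
      simp only [pvNChunk, pvNBlock, hq, hr, hc, if_true, if_false]
      simp
    · have hF : (m + 49) / 50 = m / 50 + 1 := by omega
      have hF' : (m + 1 + 49) / 50 = m / 50 + 1 := by omega
      rw [hF, hF', List.range_succ, List.flatMap_append, List.flatMap_append]
      have hstable : ∀ f ∈ List.range (m / 50), pvNBlock (m + 1) f = pvNBlock m f := by
        intro f hf
        rw [List.mem_range] at hf
        have hm1 : min (m - 50 * f) 50 = 50 := by omega
        have hm2 : min (m + 1 - 50 * f) 50 = 50 := by omega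
        simp only [pvNBlock, hm1, hm2]
      rw [pv_flatMap_congr hstable, List.append_assoc]
      congr 1
      simp only [List.flatMap_cons, List.flatMap_nil, List.append_nil]
      have hmin : min (m - 50 * (m / 50)) 50 = m % 50 := by omega
      have hmin' : min (m + 1 - 50 * (m / 50)) 50 = m % 50 + 1 := by omega
      have hlast : 50 * (m / 50) + m % 50 = m := by omega
      have hns : m % 50 ≠ 50 := by omega
      simp only [pvNChunk, pvNBlock, hmin, hmin', hr, hns, if_false,
        List.range_succ, List.map_append, List.map_cons, List.map_nil, hlast,
        List.nil_append, List.append_nil]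
      by_cases h49 : m % 50 = 49
      · have hc : (m + 1) % 50 = 0 := by omega
        have h50 : m % 50 + 1 = 50 := by omega
        simp [hc, h50, List.append_assoc]
      · have hc : (m + 1) % 50 ≠ 0 := by omega
        have h50 : m % 50 + 1 ≠ 50 := by omega
        simp [hc, h50]

lemma pvKey (n : Int) :
    (PySem.List.pyRange 0 n 1).flatMap pvChunk
    = (PySem.List.pyRange 0 (PySem.Int.floordiv (n + 49) 50) 1).flatMap (pvBStrings n) := by
  by_cases hn : n ≤ 0
  · have hF : PySem.Int.floordiv (n + 49) 50 ≤ 0 := by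
      have h1 : PySem.Int.floordiv (n + 49) 50 < 1 :=
        (PySem.Int.floordiv_lt_iff_lt_mul (by norm_num)).mpr (by omega)
      omega
    rw [PySem.List.pyRange_one_eq_nil hn, PySem.List.pyRange_one_eq_nil hF]
    rfl
  · have hpos : (0 : Int) ≤ n := by omega
    obtain ⟨m, rfl⟩ : ∃ m : Nat, n = (m : Int) := ⟨n.toNat, (Int.toNat_of_nonneg hpos).symm⟩
    have hF : PySem.Int.floordiv ((m : Int) + 49) 50 = (((m + 49) / 50 : Nat) : Int) := by
      have hcast : ((m : Int) + 49) = ((m + 49 : Nat) : Int) := by push_cast; ring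
      rw [hcast]; exact_mod_cast PySem.Int.floordiv_natCast (m + 49) 50
    rw [PySem.List.pyRange_zero_natCast m, List.flatMap_map,
      pv_flatMap_congr (fun k _ => pvChunk_cast k), pvMain m, hF,
      PySem.List.pyRange_zero_natCast, List.flatMap_map]
    apply pv_flatMap_congr
    intro f hf
    rw [List.mem_range] at hf
    have hlt : 50 * f + 1 ≤ m := by omega
    have hstart : ((50 : Int) * (f : Int)) = ((50 * f : Nat) : Int) := by push_cast; ring
    have hsize : (if (m : Int) - ((50 * f : Nat) : Int) < 50 then (m : Int) - ((50 * f : Nat) : Int) else 50)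
        = ((min (m - 50 * f) 50 : Nat) : Int) := by
      split_ifs with h <;> omega
    have e50 : (((min (m - 50 * f) 50 : Nat) : Int) = 50) ↔ (min (m - 50 * f) 50 = 50) := by omega
    simp only [pvBStrings, pvNBlock, hstart, hsize, PySem.List.pyRange_zero_natCast, List.map_map,
      beq_iff_eq, e50]
    have hfun : (fun j : Nat => pvBmB ((50 * f + j : Nat) : Int))
        = ((fun j : Int => pvBmB (((50 * f : Nat) : Int) + j)) ∘ fun k : Nat => (k : Int)) := by
      funext j
      simp only [Function.comp_apply]
      congr 1
    rw [hfun]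

lemma pv_intercalate_cons_cons (sep a b : List Char) (t : List (List Char)) :
    List.intercalate sep (a :: b :: t) = a ++ sep ++ List.intercalate sep (b :: t) := by
  simp [List.intercalate, List.intersperse]

lemma pv_intercalate_last (sep : List Char) (cs : List (List Char)) (x : List Char) :
    List.intercalate sep (cs ++ [x]) = cs.flatMap (· ++ sep) ++ x := by
  induction cs with
  | nil => simp [List.intercalate]
  | cons a t ih =>
    rcases ht : t ++ [x] with _ | ⟨b, u⟩
    · simp at ht
    · rw [List.cons_append, ht, pv_intercalate_cons_cons, ← ht, ih]
      simp [List.append_assoc]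

/-- "\n".join(l + [x]) at character level. -/
lemma pv_join_nl (l : List String) (x : String) :
    (PySem.Str.join "\n" (l ++ [x])).toList = l.flatMap pvAddNL ++ x.toList := by
  simp only [PySem.Str.join, String.toList_ofList, PySem.Chars.join, List.map_append,
    List.map_cons, List.map_nil]
  rw [show ("\n" : String).toList = ['\n'] from by decide, pv_intercalate_last, List.flatMap_map]
  rfl

/-- "".join(L) at character level. -/
lemma pv_join_empty (L : List String) :
    (PySem.Str.join "" L).toList = L.flatMap String.toList := by
  simp only [PySem.Str.join, String.toList_ofList, PySem.Chars.join]
  rw [show ("" : String).toList = ([] : List Char) from rfl]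
  have hflat : ∀ cs : List (List Char), List.intercalate ([] : List Char) cs = cs.flatten := by
    intro cs
    induction cs with
    | nil => simp [List.intercalate]
    | cons a t ih => cases t <;> simp_all [List.intercalate, List.intersperse]
  rw [hflat, List.flatten_eq_flatMap, List.flatMap_map]
  rfl

lemma pv_foldl_str (l : List Int) (g : Int → String) (b : String) :
    (l.foldl (fun b i => b ++ g i) b).toList = b.toList ++ l.flatMap (fun i => (g i).toList) := by
  induction l generalizing b with
  | nil => simp
  | cons i t ih => simp [ih, String.toList_append]

lemma pv_line_toList (i : Int) : (pvLine i).toList = pvAddNL (pvBmB i) := by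
  simp only [pvLine, pvBmB, pvAddNL, String.toList_append, List.append_assoc]
  rw [show ("</A>\n" : String).toList = ("</A>" : String).toList ++ ['\n'] from by decide]

lemma pv_block_toList (n f : Int) :
    (pvBlock n f).toList = (pvBStrings n f).flatMap pvAddNL := by
  have hsz : (min (50 * f + 50) n - 50 * f).toNat
      = ((if n - 50 * f < 50 then n - 50 * f else 50) - 0).toNat := by
    split_ifs with h <;> omega
  have h0 : ("<DT><H3 ADD_DATE=\"" ++ PySem.Int.toStr (1600000000 + 50 * f) ++ "\" LAST_MODIFIED=\"" ++
      PySem.Int.toStr (1600000000 + 50 * f) ++ "\">Chrome Folder " ++ PySem.Int.toStr f ++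
      "</H3>\n<DL><p>\n").toList
      = pvAddNL (pvHdrB f (50 * f)) ++ pvAddNL "<DL><p>" := by
    simp only [pvAddNL, pvHdrB, String.toList_append, List.append_assoc]
    rw [show ("</H3>\n<DL><p>\n" : String).toList
        = ("</H3>" : String).toList ++ (['\n'] ++ (("<DL><p>" : String).toList ++ ['\n'])) from by decide]
  have htail : ("</DL><p>\n" : String).toList = pvAddNL "</DL><p>" := by decide
  by_cases hc : min (50 * f + 50) n = 50 * f + 50
  · have hc2 : (if n - 50 * f < 50 then n - 50 * f else 50) = 50 := by omega
    simp only [pvBlock, pvBStrings, hc, hc2, beq_self_eq_true, if_true, String.toList_append,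
      pv_foldl_str, h0, htail, PySem.List.pyRange_one, hsz, List.flatMap_map, pv_line_toList,
      List.flatMap_cons, List.flatMap_nil, List.append_nil, List.append_assoc, zero_add, hc2]
    rw [show (50 * f + 50 - 50 * f).toNat = ((50 : Int) - 0).toNat from by omega]
    simp [List.flatMap_append, List.flatMap_map, List.append_assoc]
  · have hc2 : (if n - 50 * f < 50 then n - 50 * f else 50) ≠ 50 := by omega
    have hb : (min (50 * f + 50) n == 50 * f + 50) = false := by simp [hc]
    have hb2 : ((if n - 50 * f < 50 then n - 50 * f else 50) == 50) = false := by simp [hc2]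
    simp only [pvBlock, pvBStrings, hb, hb2, Bool.false_eq_true, if_false, String.toList_append,
      pv_foldl_str, h0, PySem.List.pyRange_one, hsz, List.flatMap_map, pv_line_toList,
      List.flatMap_cons, List.flatMap_nil, List.append_nil, List.append_assoc, zero_add]
    simp [List.flatMap_append, List.flatMap_map, List.append_assoc]

-- ===== VERDICT (by name: the statement is the Claim_ definition above) =====
set_option maxRecDepth 8192 in
theorem generate_chrome_bookmark_html_py_spec : Claim_equal_generate_chrome_bookmark_html_py := by
  intro n _
  unfold Spec_generate_chrome_bookmark_html_py
  apply String.toList_inj.mp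
  simp only [generate_chrome_bookmark_html_py, generate_chrome_bookmark_html_py_alt]
  rw [pvA_parts, pv_join_nl, List.flatMap_append, String.toList_append, String.toList_append,
    pv_join_empty, List.flatMap_map, pvKey, List.flatMap_assoc]
  rw [pv_flatMap_congr (fun f _ => (pv_block_toList n f).symm)]
  rw [show (["<!DOCTYPE NETSCAPE-Bookmark-file-1>",
     "<META HTTP-EQUIV=\"Content-Type\" CONTENT=\"text/html; charset=UTF-8\">",
     "<TITLE>Bookmarks</TITLE>",
     "<H1>Bookmarks Menu</H1>",
     "<DL><p>"] : List String).flatMap pvAddNL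
    = ("<!DOCTYPE NETSCAPE-Bookmark-file-1>\n<META HTTP-EQUIV=\"Content-Type\" CONTENT=\"text/html; charset=UTF-8\">\n<TITLE>Bookmarks</TITLE>\n<H1>Bookmarks Menu</H1>\n<DL><p>\n" : String).toList
    from by decide]
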